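-- pv_equiv track=rewrite | github.com/pypi-data/pypi-mirror-29 | packages/mangoes/mangoes-1.0.1.tar.gz/mangoes-1.0.1/mangoes/context.py | _window_dirty
-- ===== SOURCE A (Python) =====
-- def _window_dirty(index, sentence, size_before=0, size_after=1):
--     before_list = []
--     after_list = []
--
--     i = index - 1
--     while i >= 0 and len(before_list) < size_before:
--         if sentence[i] > -1:
--             before_list.append(sentence[i])
--         i -= 1
--     before_list = list(reversed(before_list))
--
--     i = index + 1
--     while i < len(sentence) and len(after_list) < size_after:
--         if sentence[i] > -1:
--             after_list.append(sentence[i])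
--         i += 1
--
--     return before_list + after_list
-- ===== SOURCE B (Python) =====
-- def _window_dirty(index, sentence, size_before=0, size_after=1):
--     before = [t for t in sentence[:index] if t > -1]
--     after = [t for t in sentence[index + 1:] if t > -1]
--     return before[max(len(before) - size_before, 0):] + after[:max(size_after, 0)]
-- ===== Notes on version B (the rewrite author's own statement) =====
-- stated objective: simpler
-- what changed: Replaces A's two early-terminating bounded index scans (backward scan plus an explicit reversal, forward scan) with two slice-filter comprehensions followed by end-slicing (last size_before kept tokens, first size_after kept tokens).
-- outside the precondition, e.g. on _window_dirty(-1, [1, 2, 3], 1, 1): A returns [1], B returns [2, 1]; on _window_dirty(-2, [1, 2, 3], 0, 3): A returns [3, 1, 2], B returns [3]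
import Mathlib
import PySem

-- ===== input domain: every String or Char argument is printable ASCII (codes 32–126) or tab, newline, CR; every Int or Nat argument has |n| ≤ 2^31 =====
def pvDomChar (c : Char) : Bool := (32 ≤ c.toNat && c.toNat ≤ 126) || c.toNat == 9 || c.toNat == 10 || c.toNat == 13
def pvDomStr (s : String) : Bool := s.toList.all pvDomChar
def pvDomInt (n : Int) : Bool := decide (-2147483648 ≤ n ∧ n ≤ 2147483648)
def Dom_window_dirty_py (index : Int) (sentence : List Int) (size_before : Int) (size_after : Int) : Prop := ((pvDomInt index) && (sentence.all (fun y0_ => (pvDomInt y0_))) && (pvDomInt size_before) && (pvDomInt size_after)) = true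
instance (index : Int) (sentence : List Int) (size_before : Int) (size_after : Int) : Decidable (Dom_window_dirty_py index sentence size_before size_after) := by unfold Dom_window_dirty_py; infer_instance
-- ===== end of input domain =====

-- B replaces A's two early-terminating bounded index scans (and the reversal of the backward one)
-- by filtering each side's slice once and slicing the needed end off; objective: simpler.

-- ===== PORT A =====
-- 'i = index - 1; while i >= 0 and len(before_list) < size_before: …; i -= 1'
def wdBeforeLoop (sentence : List Int) (size_before : Int) (i : Int) (acc : List Int) : List Int :=
  if _h : 0 ≤ i ∧ (acc.length : Int) < size_before then
    match PySem.List.pyGet? sentence i with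
    | some v => wdBeforeLoop sentence size_before (i - 1) (if v > -1 then acc ++ [v] else acc)
    | none => acc  -- IndexError in Python (outside Pre_)
  else acc
termination_by (i + 1).toNat
decreasing_by omega

-- 'i = index + 1; while i < len(sentence) and len(after_list) < size_after: …; i += 1'
def wdAfterLoop (sentence : List Int) (size_after : Int) (i : Int) (acc : List Int) : List Int :=
  if _h : i < (sentence.length : Int) ∧ (acc.length : Int) < size_after then
    match PySem.List.pyGet? sentence i with
    | some v => wdAfterLoop sentence size_after (i + 1) (if v > -1 then acc ++ [v] else acc)
    | none => acc  -- IndexError in Python (outside Pre_)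
  else acc
termination_by ((sentence.length : Int) - i).toNat
decreasing_by omega

def window_dirty_py (index : Int) (sentence : List Int) (size_before : Int) (size_after : Int) : List Int :=
  (wdBeforeLoop sentence size_before (index - 1) []).reverse
    ++ wdAfterLoop sentence size_after (index + 1) []

-- ===== PORT B =====
def window_dirty_py_alt (index : Int) (sentence : List Int) (size_before : Int) (size_after : Int) : List Int :=
  let before := (PySem.List.slice sentence none (some index)).filter (fun t => t > -1)
  let after := (PySem.List.slice sentence (some (index + 1)) none).filter (fun t => t > -1)
  PySem.List.slice before (some (max ((before.length : Int) - size_before) 0)) none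
    ++ PySem.List.slice after none (some (max size_after 0))

-- ===== PRECONDITION & SPEC =====
-- Pre_ restricts to the function's natural domain of nonnegative token positions: for index < 0 A's
-- scans hit Python negative-index wraparound and return accidental values (which B's slicing does not
-- reproduce), and for index > len(sentence) with size_before > 0 A raises IndexError.
def Pre_window_dirty_py (index : Int) (sentence : List Int) (size_before : Int) (size_after : Int) : Prop :=
  0 ≤ index ∧ (index ≤ (sentence.length : Int) ∨ size_before ≤ 0)
instance (index : Int) (sentence : List Int) (size_before : Int) (size_after : Int) : Decidable (Pre_window_dirty_py index sentence size_before size_after) := by unfold Pre_window_dirty_py; infer_instance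

def pvWitness_window_dirty_py : Int × List Int × Int × Int := (2, [5, -1, 7, 8], 1, 2)

def Spec_window_dirty_py (index : Int) (sentence : List Int) (size_before : Int) (size_after : Int) (out : List Int) : Prop := out = window_dirty_py_alt index sentence size_before size_after
instance (index : Int) (sentence : List Int) (size_before : Int) (size_after : Int) (out : List Int) : Decidable (Spec_window_dirty_py index sentence size_before size_after out) := by unfold Spec_window_dirty_py; infer_instance

-- ===== CLAIM (what is proved, stated in full; the proofs are below) =====
def Claim_equal_window_dirty_py : Prop := ∀ (index : Int) (sentence : List Int) (size_before : Int) (size_after : Int), Dom_window_dirty_py index sentence size_before size_after → Pre_window_dirty_py index sentence size_before size_after → Spec_window_dirty_py index sentence size_before size_after (window_dirty_py index sentence size_before size_after)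

-- ===== LEMMAS AND PROOFS =====

-- the forward loop collects, from position i on, the first (size_after - |acc|) kept tokens
lemma wdAfterLoop_spec (s : List Int) (sa : Int) :
    ∀ (i : Int) (acc : List Int), 0 ≤ i →
      wdAfterLoop s sa i acc
        = acc ++ ((s.drop i.toNat).filter (fun t => t > -1)).take (sa - acc.length).toNat := by
  intro i acc
  induction i, acc using wdAfterLoop.induct s sa with
  | case1 i acc h v hget ih =>
      intro hi
      rw [wdAfterLoop, dif_pos h, hget]
      have hlen : i.toNat < s.length := by omega
      rw [PySem.List.pyGet?_of_nonneg s hi, List.getElem?_eq_getElem hlen] at hget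
      have hv : s[i.toNat] = v := by injection hget
      have hdrop : s.drop i.toNat = v :: s.drop (i.toNat + 1) := by
        rw [List.drop_eq_getElem_cons hlen, hv]
      have h1 : (i + 1).toNat = i.toNat + 1 := by omega
      have h2 : (sa - (acc.length : Int)).toNat = (sa - ((acc.length : Int) + 1)).toNat + 1 := by
        omega
      by_cases hk : v > -1
      · simp only [hk, dite_true, if_true] at ih ⊢
        rw [ih (by omega), h1, hdrop, List.filter_cons]
        simp only [hk, decide_true, if_true]
        rw [h2, List.take_succ_cons]
        simp
      · simp only [hk, dite_false, if_false] at ih ⊢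
        rw [ih (by omega), h1, hdrop, List.filter_cons]
        simp [hk]
  | case2 i acc h hget =>
      intro hi
      exfalso
      have hlen : i.toNat < s.length := by omega
      rw [PySem.List.pyGet?_of_nonneg s hi, List.getElem?_eq_getElem hlen] at hget
      exact Option.some_ne_none _ hget
  | case3 i acc h =>
      intro hi
      rw [wdAfterLoop, dif_neg h]
      have he : ((s.drop i.toNat).filter (fun t => t > -1)).take (sa - acc.length).toNat = [] := by
        rcases not_and_or.mp h with h1 | h2
        · have : s.length ≤ i.toNat := by omega
          simp [List.drop_eq_nil_of_le this]
        · have : (sa - (acc.length : Int)).toNat = 0 := by omega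
          simp [this]
      rw [he]
      simp

-- the backward loop collects the last (size_before - |acc|) kept tokens of s[:i+1], newest first
lemma wdBeforeLoop_spec (s : List Int) (sb : Int) :
    ∀ (i : Int) (acc : List Int), i < (s.length : Int) → -1 ≤ i →
      wdBeforeLoop s sb i acc
        = acc ++ (((s.take (i + 1).toNat).filter (fun t => t > -1)).reverse).take (sb - acc.length).toNat := by
  intro i acc
  induction i, acc using wdBeforeLoop.induct s sb with
  | case1 i acc h v hget ih =>
      intro hilen hi
      rw [wdBeforeLoop, dif_pos h, hget]
      have hi0 : 0 ≤ i := h.1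
      have hlen : i.toNat < s.length := by omega
      rw [PySem.List.pyGet?_of_nonneg s hi0, List.getElem?_eq_getElem hlen] at hget
      have hv : s[i.toNat] = v := by injection hget
      have h1 : (i + 1).toNat = i.toNat + 1 := by omega
      have htake : s.take (i + 1).toNat = s.take i.toNat ++ [v] := by
        rw [h1, List.take_add_one, List.getElem?_eq_getElem hlen, hv]
        rfl
      have h3 : i - 1 + 1 = i := by omega
      by_cases hk : v > -1
      · simp only [hk, dite_true, if_true] at ih ⊢
        rw [ih (by omega) (by omega), h3, htake, List.filter_append, List.reverse_append]
        simp only [hk, List.filter_cons, decide_true, List.filter_nil, if_true,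
          List.reverse_cons, List.reverse_nil, List.nil_append, List.singleton_append]
        have h5 : (sb - (acc.length : Int)).toNat = (sb - ((acc.length : Int) + 1)).toNat + 1 := by
          omega
        rw [h5, List.take_succ_cons]
        simp
      · simp only [hk, dite_false, if_false] at ih ⊢
        rw [ih (by omega) (by omega), h3, htake, List.filter_append]
        simp [hk]
  | case2 i acc h hget =>
      intro hilen hi
      exfalso
      have hi0 : 0 ≤ i := h.1
      have hlen : i.toNat < s.length := by omega
      rw [PySem.List.pyGet?_of_nonneg s hi0, List.getElem?_eq_getElem hlen] at hget
      exact Option.some_ne_none _ hget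
  | case3 i acc h =>
      intro hilen hi
      rw [wdBeforeLoop, dif_neg h]
      have he : (((s.take (i + 1).toNat).filter (fun t => t > -1)).reverse).take (sb - acc.length).toNat = [] := by
        rcases not_and_or.mp h with h1 | h2
        · have : (i + 1).toNat = 0 := by omega
          simp [this]
        · have : (sb - (acc.length : Int)).toNat = 0 := by omega
          simp [this]
      rw [he]
      simp

lemma reverse_take_reverse (l : List Int) (k : Nat) :
    (l.reverse.take k).reverse = l.drop (l.length - k) := by
  rw [List.take_reverse, List.reverse_reverse]

-- ===== VERDICT (by name: the statement is the Claim_ definition above) =====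
theorem window_dirty_py_spec : Claim_equal_window_dirty_py := by
  intro index s sb sa _dom hpre
  obtain ⟨hi0, hcase⟩ := hpre
  unfold Spec_window_dirty_py window_dirty_py
  simp only [window_dirty_py_alt]
  -- B's slices as take/drop
  have hsliceTo : PySem.List.slice s none (some index) = s.take index.toNat := by
    have h := PySem.List.slice_to_natCast (xs := s) (b := index.toNat)
    rwa [show ((index.toNat : Nat) : Int) = index from by omega] at h
  have hsliceFrom : PySem.List.slice s (some (index + 1)) none = s.drop (index + 1).toNat := by
    have h := PySem.List.slice_from_natCast (xs := s) (a := (index + 1).toNat)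
    rwa [show (((index + 1).toNat : Nat) : Int) = index + 1 from by omega] at h
  rw [hsliceTo, hsliceFrom]
  -- the after side
  have hafter : wdAfterLoop s sa (index + 1) []
      = ((s.drop (index + 1).toNat).filter (fun t => t > -1)).take (max sa 0).toNat := by
    rw [wdAfterLoop_spec s sa (index + 1) [] (by omega)]
    simp only [List.length_nil, Nat.cast_zero, Int.sub_zero, List.nil_append]
    congr 1
    omega
  have hafterB : PySem.List.slice ((s.drop (index + 1).toNat).filter (fun t => t > -1)) none
        (some (max sa 0))
      = ((s.drop (index + 1).toNat).filter (fun t => t > -1)).take (max sa 0).toNat := by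
    have h := PySem.List.slice_to_natCast
      (xs := (s.drop (index + 1).toNat).filter (fun t => t > -1)) (b := (max sa 0).toNat)
    rwa [show (((max sa 0).toNat : Nat) : Int) = max sa 0 from by omega] at h
  rw [hafter, hafterB]
  -- the before side: both are the last size_before kept tokens of sentence[:index]
  have hbeforeB : ∀ (P : List Int),
      PySem.List.slice P (some (max ((P.length : Int) - sb) 0)) none
        = P.drop (P.length - sb.toNat) := by
    intro P
    have h := PySem.List.slice_from_natCast (xs := P)
      (a := (max ((P.length : Int) - sb) 0).toNat)
    rw [show (((max ((P.length : Int) - sb) 0).toNat : Nat) : Int)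
        = max ((P.length : Int) - sb) 0 from by omega] at h
    rw [h]
    by_cases hs : 0 ≤ sb
    · congr 1
      omega
    · rw [List.drop_eq_nil_of_le (by omega), List.drop_eq_nil_of_le (by omega)]
  rw [hbeforeB]
  congr 1
  by_cases hsb : 0 < sb
  · have hlen : index ≤ (s.length : Int) := by
      rcases hcase with h | h
      · exact h
      · omega
    rw [wdBeforeLoop_spec s sb (index - 1) [] (by omega) (by omega)]
    simp only [List.length_nil, Nat.cast_zero, Int.sub_zero, List.nil_append]
    rw [show index - 1 + 1 = index from by omega, reverse_take_reverse]
  · rw [wdBeforeLoop, dif_neg (by simp; omega)]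
    rw [List.drop_eq_nil_of_le (by omega)]
    simp
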